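-- pv_equiv track=rewrite | github.com/jbirby/Flex-Codec | scripts/flex_common.py | encode_numeric
-- ===== SOURCE A (Python) =====
-- NUM_CHAR_MAP = {
--     '0': 0x0, '1': 0x1, '2': 0x2, '3': 0x3, '4': 0x4,
--     '5': 0x5, '6': 0x6, '7': 0x7, '8': 0x8, '9': 0x9,
--     ' ': 0xA, 'U': 0xB, '-': 0xC, '[': 0xD, ']': 0xE,
-- }
--
-- def encode_numeric(text):
--     nibbles = [NUM_CHAR_MAP.get(c, 0xF) for c in text]
--     while len(nibbles) % 5 != 0:
--         nibbles.append(0xF)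
--     chunks = []
--     for i in range(0, len(nibbles), 5):
--         v = 0
--         for nib in nibbles[i:i + 5]:
--             v = (v << 4) | nib
--         chunks.append((v & 0xFFFFF) << 1)
--     return chunks
-- ===== SOURCE B (Python) =====
-- NUM_CHAR_MAP = {
--     '0': 0x0, '1': 0x1, '2': 0x2, '3': 0x3, '4': 0x4,
--     '5': 0x5, '6': 0x6, '7': 0x7, '8': 0x8, '9': 0x9,
--     ' ': 0xA, 'U': 0xB, '-': 0xC, '[': 0xD, ']': 0xE,
-- }
--
-- def encode_numeric(text):
--     # single streaming pass: pack nibbles into 20-bit chunks as characters arrive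
--     chunks = []
--     v = 0
--     k = 0
--     for c in text:
--         v = (v << 4) | NUM_CHAR_MAP.get(c, 0xF)
--         k += 1
--         if k == 5:
--             chunks.append((v & 0xFFFFF) << 1)
--             v = 0
--             k = 0
--     if k != 0:
--         while k < 5:
--             v = (v << 4) | 0xF
--             k += 1
--         chunks.append((v & 0xFFFFF) << 1)
--     return chunks
-- ===== Notes on version B (the rewrite author's own statement) =====
-- stated objective: alternative
-- what changed: Replaced A's three passes (build full nibble list, pad it to a multiple of 5, then re-scan it in slices of 5) by a single streaming pass that packs each character's nibble into an accumulator and emits a chunk every 5 characters, padding only the final partial accumulator.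
import Mathlib
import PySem

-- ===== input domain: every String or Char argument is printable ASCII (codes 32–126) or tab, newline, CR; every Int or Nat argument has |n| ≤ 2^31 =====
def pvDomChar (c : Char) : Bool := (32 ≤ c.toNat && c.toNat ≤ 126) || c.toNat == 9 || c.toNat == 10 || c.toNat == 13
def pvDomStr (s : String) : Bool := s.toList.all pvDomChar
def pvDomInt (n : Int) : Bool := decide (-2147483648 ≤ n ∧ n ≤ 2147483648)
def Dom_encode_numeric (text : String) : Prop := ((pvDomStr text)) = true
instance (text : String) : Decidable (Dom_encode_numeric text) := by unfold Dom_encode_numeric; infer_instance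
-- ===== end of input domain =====

-- B replaces A's three passes (build the nibble list, pad it to a multiple of 5, re-scan it
-- in slices of 5) by a single streaming pass that emits a chunk every 5 characters (objective: alternative).


-- shared module constant (identical dict literal in both Python sources)
def NUM_CHAR_MAP : PySem.Dict Char Int :=
  PySem.Dict.ofList [('0', 0x0), ('1', 0x1), ('2', 0x2), ('3', 0x3), ('4', 0x4),
    ('5', 0x5), ('6', 0x6), ('7', 0x7), ('8', 0x8), ('9', 0x9),
    (' ', 0xA), ('U', 0xB), ('-', 0xC), ('[', 0xD), (']', 0xE)]
-- ===== PORT A =====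
-- nibbles = [NUM_CHAR_MAP.get(c, 0xF) for c in text]
def nibsA (cs : List Char) : List Int := cs.map (fun c => NUM_CHAR_MAP.getD c 0xF)
-- while len(nibbles) % 5 != 0: nibbles.append(0xF)   (fuel 5 only makes it total: at most 4 appends)
def padGo : Nat → List Int → List Int
  | 0, ns => ns
  | fuel + 1, ns => if ns.length % 5 ≠ 0 then padGo fuel (ns ++ [0xF]) else ns
def padA (ns : List Int) : List Int := padGo 5 ns
-- for i in range(0, len(nibbles), 5): v = 0; for nib in nibbles[i:i+5]: v = (v<<4)|nib; chunks.append((v & 0xFFFFF) << 1)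
def loopA : List Int → List Int → List Int
  | [], chunks => chunks
  | a :: b :: c :: d :: e :: rest, chunks =>
      loopA rest (chunks ++
        [PySem.Int.band ([a, b, c, d, e].foldl (fun v nib => PySem.Int.bor (v <<< 4) nib) 0) 0xFFFFF <<< 1])
  | ns, chunks =>
      chunks ++ [PySem.Int.band (ns.foldl (fun v nib => PySem.Int.bor (v <<< 4) nib) 0) 0xFFFFF <<< 1]
def encode_numeric (text : String) : List Int := loopA (padA (nibsA text.toList)) []
-- ===== PORT B =====
-- loop body: shift the char's nibble into v, flush a chunk when k reaches 5
def stepB (st : List Int × Int × Nat) (c : Char) : List Int × Int × Nat :=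
  let v := PySem.Int.bor (st.2.1 <<< 4) (NUM_CHAR_MAP.getD c 0xF)
  let k := st.2.2 + 1
  if k = 5 then (st.1 ++ [PySem.Int.band v 0xFFFFF <<< 1], 0, 0) else (st.1, v, k)
-- while k < 5: v = (v << 4) | 0xF; k += 1   (fuel 5 only makes it total)
def padBGo : Nat → Int → Nat → Int
  | 0, v, _ => v
  | fuel + 1, v, k => if k < 5 then padBGo fuel (PySem.Int.bor (v <<< 4) 0xF) (k + 1) else v
def padB (v : Int) (k : Nat) : Int := padBGo 5 v k
-- if k != 0: append the padded final chunk
def finishB (st : List Int × Int × Nat) : List Int :=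
  if st.2.2 ≠ 0 then st.1 ++ [PySem.Int.band (padB st.2.1 st.2.2) 0xFFFFF <<< 1] else st.1
def encode_numeric_alt (text : String) : List Int :=
  finishB (text.toList.foldl stepB ([], 0, 0))


-- ===== PRECONDITION & SPEC =====
def Spec_encode_numeric (text : String) (out : List Int) : Prop := out = encode_numeric_alt text
instance (text : String) (out : List Int) : Decidable (Spec_encode_numeric text out) := by unfold Spec_encode_numeric; infer_instance

-- ===== CLAIM (what is proved, stated in full; the proofs are below) =====
def Claim_equal_encode_numeric : Prop := ∀ (text : String), Dom_encode_numeric text → Spec_encode_numeric text (encode_numeric text)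

-- ===== LEMMAS AND PROOFS =====

theorem loopA_acc : ∀ (ns chunks : List Int), loopA ns chunks = chunks ++ loopA ns []
  | [], chunks => by simp [loopA]
  | a :: b :: c :: d :: e :: rest, chunks => by
      rw [loopA, loopA, loopA_acc rest, loopA_acc rest ([] ++ _)]
      simp
  | [x], chunks => by simp [loopA]
  | [x, y], chunks => by simp [loopA]
  | [x, y, z], chunks => by simp [loopA]
  | [x, y, z, w], chunks => by simp [loopA]

theorem padGo_eq : ∀ (fuel : Nat) (ns : List Int), (5 - ns.length % 5) % 5 ≤ fuel →
    padGo fuel ns = ns ++ List.replicate ((5 - ns.length % 5) % 5) (0xF : Int)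
  | 0, ns, h => by
      have : ns.length % 5 = 0 := by omega
      simp [padGo, this]
  | fuel + 1, ns, h => by
      by_cases h0 : ns.length % 5 = 0
      · simp [padGo, h0]
      · rw [padGo, if_pos (by simpa using h0),
            padGo_eq fuel (ns ++ [0xF]) (by simp [Nat.add_mod]; omega)]
        have hm : ((5 - (ns ++ [0xF]).length % 5) % 5) + 1 = (5 - ns.length % 5) % 5 := by
          simp [Nat.add_mod]; omega
        rw [List.append_assoc, ← hm, List.replicate_succ]
        simp

theorem padA_append5 (n5 ms : List Int) (h5 : n5.length = 5) :
    padA (n5 ++ ms) = n5 ++ padA ms := by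
  unfold padA
  rw [padGo_eq 5 (n5 ++ ms) (by omega), padGo_eq 5 ms (by omega)]
  simp [h5]

theorem mainB : ∀ (cs : List Char) (acc : List Int),
    finishB (cs.foldl stepB (acc, 0, 0)) = acc ++ loopA (padA (nibsA cs)) []
  | [], acc => by
      simp [finishB, nibsA, padA, padGo, loopA]
  | [a], acc => by
      simp [finishB, stepB, padB, padBGo, nibsA, padA, padGo, loopA, List.foldl]
  | [a, b], acc => by
      simp [finishB, stepB, padB, padBGo, nibsA, padA, padGo, loopA, List.foldl]
  | [a, b, c], acc => by
      simp [finishB, stepB, padB, padBGo, nibsA, padA, padGo, loopA, List.foldl]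
  | [a, b, c, d], acc => by
      simp [finishB, stepB, padB, padBGo, nibsA, padA, padGo, loopA, List.foldl]
  | a :: b :: c :: d :: e :: rest, acc => by
      have hfold : (a :: b :: c :: d :: e :: rest).foldl stepB (acc, 0, 0)
          = rest.foldl stepB (acc ++
              [PySem.Int.band
                (PySem.Int.bor (PySem.Int.bor (PySem.Int.bor (PySem.Int.bor (PySem.Int.bor
                  ((0 : Int) <<< 4) (NUM_CHAR_MAP.getD a 0xF) <<< 4) (NUM_CHAR_MAP.getD b 0xF) <<< 4)
                  (NUM_CHAR_MAP.getD c 0xF) <<< 4) (NUM_CHAR_MAP.getD d 0xF) <<< 4)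
                  (NUM_CHAR_MAP.getD e 0xF)) 0xFFFFF <<< 1], 0, 0) := by
        simp [List.foldl, stepB]
      rw [hfold, mainB rest]
      have h5 : nibsA (a :: b :: c :: d :: e :: rest)
          = nibsA [a, b, c, d, e] ++ nibsA rest := by simp [nibsA]
      rw [h5, padA_append5 _ _ (by simp [nibsA])]
      simp only [nibsA, List.map_cons, List.map_nil, List.cons_append, List.nil_append]
      rw [loopA]
      simp [List.foldl]
      conv_rhs => rw [loopA_acc]
      simp

-- ===== VERDICT (by name: the statement is the Claim_ definition above) =====
theorem encode_numeric_spec : Claim_equal_encode_numeric := by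
  intro text _
  unfold Spec_encode_numeric encode_numeric encode_numeric_alt
  exact (mainB text.toList []).symm
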